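-- pv_equiv track=rewrite | github.com/sanyanema/OptionsWatchlist | OGC-new-ui/app/options_info.py | findContractExpirationDate
-- ===== SOURCE A (Python) =====
-- def findContractExpirationDate(contract):
--     expirationDate = '20'
--     counter = 0
--     for character in contract:
--         if counter < 6:
--             if counter % 2 == 0 and counter > 0:
--                 expirationDate = expirationDate + "-"
--             expirationDate = expirationDate + character
--         counter += 1
--     return expirationDate
-- ===== SOURCE B (Python) =====
-- def findContractExpirationDate(contract):
--     chunks = [contract[0:2], contract[2:4], contract[4:6]]
--     return '20' + '-'.join(c for c in chunks if c)
-- ===== Notes on version B (the rewrite author's own statement) =====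
-- stated objective: simpler
-- what changed: Replaces the counter/%2 character loop over the whole string with a single expression: three 2-character slices, empty chunks dropped, joined with a dash after the century prefix.
import Mathlib
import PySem

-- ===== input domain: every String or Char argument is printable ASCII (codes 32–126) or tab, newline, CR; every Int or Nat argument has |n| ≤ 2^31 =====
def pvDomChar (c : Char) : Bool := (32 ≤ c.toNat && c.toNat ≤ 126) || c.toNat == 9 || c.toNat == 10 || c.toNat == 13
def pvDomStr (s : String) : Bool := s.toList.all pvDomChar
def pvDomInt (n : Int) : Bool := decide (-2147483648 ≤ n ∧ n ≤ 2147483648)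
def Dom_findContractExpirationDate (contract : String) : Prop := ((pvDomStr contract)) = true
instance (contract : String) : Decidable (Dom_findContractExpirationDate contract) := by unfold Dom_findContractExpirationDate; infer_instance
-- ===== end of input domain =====

-- B: replaces A's counter/%2 character loop with three 2-char slices joined by '-' after '20' (simpler).


-- ===== PORT A =====
-- state: (expirationDate as code points, counter); string concatenation = list append (exact on code points)
def pvStepA (p : List Char × Int) (character : Char) : List Char × Int :=
  let expirationDate :=
    if p.2 < 6 then
      (if p.2 % 2 == 0 && decide (p.2 > 0) then p.1 ++ ['-'] else p.1) ++ [character]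
    else p.1
  (expirationDate, p.2 + 1)

def findContractExpirationDate (contract : String) : String :=
  String.ofList (contract.toList.foldl pvStepA (['2','0'], 0)).1

-- ===== PORT B =====
def findContractExpirationDate_alt (contract : String) : String :=
  let cs := contract.toList
  let chunks := [PySem.List.slice cs (some 0) (some 2),
                 PySem.List.slice cs (some 2) (some 4),
                 PySem.List.slice cs (some 4) (some 6)]
  String.ofList (['2','0'] ++ PySem.Chars.join ['-'] (chunks.filter (fun c => c ≠ [])))

-- ===== PRECONDITION & SPEC =====
def Spec_findContractExpirationDate (contract : String) (out : String) : Prop := out = findContractExpirationDate_alt contract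
instance (contract : String) (out : String) : Decidable (Spec_findContractExpirationDate contract out) := by unfold Spec_findContractExpirationDate; infer_instance

-- ===== CLAIM (what is proved, stated in full; the proofs are below) =====
def Claim_equal_findContractExpirationDate : Prop := ∀ (contract : String), Dom_findContractExpirationDate contract → Spec_findContractExpirationDate contract (findContractExpirationDate contract)

-- ===== LEMMAS AND PROOFS =====
-- once counter ≥ 6 the A-loop never changes the accumulator
theorem pvStepA_ge6 (l : List Char) (e : List Char) (c : Int) (h : 6 ≤ c) :
    (l.foldl pvStepA (e, c)).1 = e := by
  induction l generalizing c with
  | nil => rfl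
  | cons a t ih =>
      simp only [List.foldl_cons, pvStepA]
      rw [if_neg (by omega)]
      exact ih (c + 1) (by omega)

theorem pv_core (l : List Char) :
    (l.foldl pvStepA (['2','0'], 0)).1 =
      ['2','0'] ++ PySem.Chars.join ['-']
        (([PySem.List.slice l (some 0) (some 2),
           PySem.List.slice l (some 2) (some 4),
           PySem.List.slice l (some 4) (some 6)]).filter (fun c => c ≠ [])) := by
  match l with
  | [] => rfl
  | [a] => rfl
  | [a,b] => rfl
  | [a,b,c] => rfl
  | [a,b,c,d] => rfl
  | [a,b,c,d,e] => rfl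
  | a::b::c::d::e::f::rest =>
      have hA : ((a::b::c::d::e::f::rest).foldl pvStepA (['2','0'], 0)).1
          = ['2','0',a,b,'-',c,d,'-',e,f] := by
        simp only [List.foldl_cons, pvStepA]
        norm_num
        exact pvStepA_ge6 rest _ 6 (le_refl 6)
      have hB1 : PySem.List.slice (a::b::c::d::e::f::rest) (some 0) (some 2) = [a,b] := by
        have := PySem.List.slice_natCast (a::b::c::d::e::f::rest) 0 2
        simpa using this
      have hB2 : PySem.List.slice (a::b::c::d::e::f::rest) (some 2) (some 4) = [c,d] := by
        have := PySem.List.slice_natCast (a::b::c::d::e::f::rest) 2 4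
        simpa using this
      have hB3 : PySem.List.slice (a::b::c::d::e::f::rest) (some 4) (some 6) = [e,f] := by
        have := PySem.List.slice_natCast (a::b::c::d::e::f::rest) 4 6
        simpa using this
      rw [hA, hB1, hB2, hB3]
      rfl

-- ===== VERDICT (by name: the statement is the Claim_ definition above) =====
theorem findContractExpirationDate_spec : Claim_equal_findContractExpirationDate := by
  intro contract _
  unfold Spec_findContractExpirationDate findContractExpirationDate findContractExpirationDate_alt
  simp only [pv_core]
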